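-- pv_equiv track=rewrite | github.com/Bingwu0109/job-counseling-chatbot | text_splitter/sliding_window_splitter.py | _calculate_sentence_step
-- ===== SOURCE A (Python) =====
-- from typing import List, Optional, Any
--
-- def _calculate_sentence_step(sentences: List[str], position: int, step_size: int) -> int:
--     """计算按字符步长对应的句子数"""
--     accumulated_length = 0
--     step_sentences = 0
--
--     for i in range(position, len(sentences)):
--         sentence_length = len(sentences[i]) + 1  # +1 for space
--         if accumulated_length + sentence_length > step_size:
--             break
--         accumulated_length += sentence_length
--         step_sentences += 1
--
--     return max(1, step_sentences)
-- ===== SOURCE B (Python) =====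
-- from bisect import bisect_right
-- from itertools import accumulate
--
-- def _calculate_sentence_step(sentences, position, step_size):
--     """Count sentences fitting in step_size via prefix sums + binary search."""
--     lens = [len(sentences[i]) + 1 for i in range(position, len(sentences))]
--     prefix = list(accumulate(lens))
--     return max(1, bisect_right(prefix, step_size))
-- ===== Notes on version B (the rewrite author's own statement) =====
-- stated objective: alternative
-- what changed: Replaces the break-on-overflow accumulation scan with building the list of adjusted sentence lengths, taking its prefix sums with accumulate, and locating the budget boundary with bisect_right.
import Mathlib
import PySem

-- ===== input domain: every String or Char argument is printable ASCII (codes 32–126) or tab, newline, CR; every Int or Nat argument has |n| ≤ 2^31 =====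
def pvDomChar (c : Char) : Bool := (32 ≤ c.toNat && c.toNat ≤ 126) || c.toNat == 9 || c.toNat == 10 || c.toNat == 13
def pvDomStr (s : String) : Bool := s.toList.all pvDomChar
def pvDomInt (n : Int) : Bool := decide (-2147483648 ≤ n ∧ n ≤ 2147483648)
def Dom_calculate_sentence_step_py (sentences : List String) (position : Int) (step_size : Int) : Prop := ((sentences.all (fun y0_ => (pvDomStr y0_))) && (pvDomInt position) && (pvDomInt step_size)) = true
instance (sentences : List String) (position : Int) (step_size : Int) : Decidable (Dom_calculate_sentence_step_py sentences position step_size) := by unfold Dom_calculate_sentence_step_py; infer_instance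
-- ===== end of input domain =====

-- B builds the adjusted-length list over range(position, len), prefix-sums it and finds the
-- step boundary with bisect_right instead of A's break-on-overflow accumulation scan
-- (alternative decomposition, same cost).


-- ===== PORT A =====
-- the for-loop over range(position, len(sentences)) with its `break`: recursion over the
-- remaining index list, carrying (accumulated_length, step_sentences); `break` = stop.
-- The `none` branch of pyGet? is Python's IndexError (excluded by Pre_).
def calculate_sentence_step_py_loop (sentences : List String) (step_size : Int) :
    List Int → Int → Int → Int
  | [], _, step_sentences => step_sentences
  | i :: rest, accumulated_length, step_sentences =>
    match PySem.List.pyGet? sentences i with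
    | none => step_sentences
    | some s =>
      let sentence_length := PySem.Str.len s + 1
      if accumulated_length + sentence_length > step_size then step_sentences
      else calculate_sentence_step_py_loop sentences step_size rest
             (accumulated_length + sentence_length) (step_sentences + 1)

def calculate_sentence_step_py (sentences : List String) (position : Int) (step_size : Int) : Int :=
  max 1 (calculate_sentence_step_py_loop sentences step_size
    (PySem.List.pyRange position (sentences.length : Int) 1) 0 0)

-- ===== PORT B =====
-- Source B: lens = [len(sentences[i]) + 1 for i in range(position, len(sentences))];
-- prefix = list(accumulate(lens)) as a fold carrying (running total, prefix list);
-- then bisect_right (PySem.List.bisectRight). pyGetD's default is a totalization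
-- guard only; the index is in range on every input Pre_ admits (same raise set as A).
def calculate_sentence_step_py_alt (sentences : List String) (position : Int) (step_size : Int) : Int :=
  let lens := (PySem.List.pyRange position (sentences.length : Int) 1).map
      (fun i => PySem.Str.len (PySem.List.pyGetD sentences i "") + 1)
  let prefixL := (lens.foldl
      (fun (acc : Int × List Int) w => (acc.1 + w, acc.2 ++ [acc.1 + w])) (0, ([] : List Int))).2
  max 1 ((PySem.List.bisectRight prefixL step_size : Nat) : Int)

-- ===== PRECONDITION & SPEC =====
-- Pre_ excludes exactly the inputs on which A raises IndexError: position < -len(sentences)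
-- (negative-index wraparound falls off the front of the list); B raises there identically.
def Pre_calculate_sentence_step_py (sentences : List String) (position : Int) (step_size : Int) : Prop :=
  -(sentences.length : Int) ≤ position
instance (sentences : List String) (position : Int) (step_size : Int) : Decidable (Pre_calculate_sentence_step_py sentences position step_size) := by unfold Pre_calculate_sentence_step_py; infer_instance

def pvWitness_calculate_sentence_step_py : List String × Int × Int := (["hi", "there"], 0, 10)

def Spec_calculate_sentence_step_py (sentences : List String) (position : Int) (step_size : Int) (out : Int) : Prop := out = calculate_sentence_step_py_alt sentences position step_size
instance (sentences : List String) (position : Int) (step_size : Int) (out : Int) : Decidable (Spec_calculate_sentence_step_py sentences position step_size out) := by unfold Spec_calculate_sentence_step_py; infer_instance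

-- ===== CLAIM (what is proved, stated in full; the proofs are below) =====
def Claim_equal_calculate_sentence_step_py : Prop := ∀ (sentences : List String) (position : Int) (step_size : Int), Dom_calculate_sentence_step_py sentences position step_size → Pre_calculate_sentence_step_py sentences position step_size → Spec_calculate_sentence_step_py sentences position step_size (calculate_sentence_step_py sentences position step_size)

-- ===== LEMMAS AND PROOFS =====

-- running prefix sums of a weight list, starting from total t (proof-side model)
def pvScanW (ws : List Int) (t : Int) : List Int :=
  match ws with
  | [] => []
  | w :: r => (t + w) :: pvScanW r (t + w)

theorem pv_len_nonneg (s : String) : 0 ≤ PySem.Str.len s := by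
  simp [PySem.Str.len_eq]

theorem pvScanW_ge (l : List Int) (t : Int) (hw : ∀ w ∈ l, 0 ≤ w) :
    ∀ x ∈ pvScanW l t, t ≤ x := by
  induction l generalizing t with
  | nil => simp [pvScanW]
  | cons w r ih =>
    intro x hx
    simp only [pvScanW, List.mem_cons] at hx
    have hw0 : 0 ≤ w := hw w (by simp)
    rcases hx with h | h
    · omega
    · have := ih (t + w) (fun u hu => hw u (by simp [hu])) x h
      omega

theorem pvScanW_pairwise (l : List Int) (t : Int) (hw : ∀ w ∈ l, 0 ≤ w) :
    (pvScanW l t).Pairwise (· ≤ ·) := by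
  induction l generalizing t with
  | nil => simp [pvScanW]
  | cons w r ih =>
    simp only [pvScanW, List.pairwise_cons]
    exact ⟨pvScanW_ge r _ (fun u hu => hw u (by simp [hu])),
      ih _ (fun u hu => hw u (by simp [hu]))⟩

theorem pvScanW_count_zero (step_size : Int) (l : List Int) (t : Int)
    (hw : ∀ w ∈ l, 0 ≤ w) (h : step_size < t) :
    (pvScanW l t).countP (fun x => decide (x ≤ step_size)) = 0 := by
  induction l generalizing t with
  | nil => simp [pvScanW]
  | cons w r ih =>
    have hw0 : 0 ≤ w := hw w (by simp)
    simp only [pvScanW, List.countP_cons]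
    rw [ih _ (fun u hu => hw u (by simp [hu])) (by omega)]
    simp only [decide_eq_true_eq]
    rw [if_neg (by omega)]

theorem pv_foldl_scanW (l : List Int) (t : Int) (xs : List Int) :
    (l.foldl (fun (acc : Int × List Int) w => (acc.1 + w, acc.2 ++ [acc.1 + w])) (t, xs)).2
    = xs ++ pvScanW l t := by
  induction l generalizing t xs with
  | nil => simp [pvScanW]
  | cons w r ih =>
    simp only [List.foldl_cons, pvScanW]
    rw [ih]
    simp

theorem pv_countP_eq_of_prefix (xs : List Int) (p : Int → Bool) :
    ∀ (k : Nat), k ≤ xs.length → (∀ j (hj : j < xs.length), (j < k ↔ p xs[j] = true)) →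
    xs.countP p = k := by
  induction xs with
  | nil =>
    intro k hk _
    have : k = 0 := Nat.le_zero.mp (by simpa using hk)
    simp [this]
  | cons x r ih =>
    intro k hk h
    cases k with
    | zero =>
      have hx : p x = false := by
        have := h 0 (by simp)
        simpa using (not_iff_not.mpr this).mp (by omega)
      rw [List.countP_cons, hx]
      rw [if_neg (by simp), add_zero]
      exact ih 0 (by omega) (fun j hj => by
        have := h (j + 1) (by simpa using by omega)
        constructor
        · omega
        · intro hp
          exact absurd (this.mpr (by simpa using hp)) (by omega))
    | succ k' =>
      have hx : p x = true := by
        have := h 0 (by simp)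
        exact this.mp (by omega)
      rw [List.countP_cons, hx, if_pos rfl]
      have : r.countP p = k' := by
        apply ih k' (by simpa using hk)
        intro j hj
        have := h (j + 1) (by simpa using by omega)
        simpa [Nat.succ_lt_succ_iff] using this
      omega

theorem pv_bisect_eq_countP (xs : List Int) (x : Int) (hs : xs.Pairwise (· ≤ ·)) :
    PySem.List.bisectRight xs x = xs.countP (fun t => decide (t ≤ x)) := by
  obtain ⟨hle, hpre, hsuf⟩ := PySem.List.bisectRight_spec xs x hs
  symm
  apply pv_countP_eq_of_prefix xs _ _ hle
  intro j hj
  constructor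
  · intro hjk; simpa using hpre j hj hjk
  · intro hp
    by_contra hjk
    have := hsuf j hj (by omega)
    simp only [decide_eq_true_eq] at hp
    omega

-- under Pre_, every index the range produces is in range: pyGet? agrees with pyGetD
theorem pv_get_eq_getD (sentences : List String) (i : Int)
    (h0 : -(sentences.length : Int) ≤ i) (h1 : i < (sentences.length : Int)) :
    PySem.List.pyGet? sentences i = some (PySem.List.pyGetD sentences i "") := by
  by_cases hn : 0 ≤ i
  · rw [PySem.List.pyGet?_eq_some_getElem sentences hn h1,
      PySem.List.pyGetD_eq_getElem sentences "" hn h1]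
  · have hk0 : 0 < (-i).toNat := by omega
    have hk1 : (-i).toNat ≤ sentences.length := by omega
    have hi : i = -(((-i).toNat : Nat) : Int) := by omega
    rw [hi, PySem.List.pyGet?_neg_natCast sentences (k := (-i).toNat) hk0 hk1,
      PySem.List.pyGetD_neg_natCast sentences (k := (-i).toNat) (d := "") hk0 hk1]
    rw [List.getElem?_eq_getElem (by omega)]

-- A's loop over any index list of in-range indices counts the prefix of the weight scan ≤ step_size
theorem pv_loop_eq_count (sentences : List String) (step_size : Int) :
    ∀ (L : List Int),
      (∀ i ∈ L, PySem.List.pyGet? sentences i = some (PySem.List.pyGetD sentences i "")) →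
    ∀ (a c : Int),
      calculate_sentence_step_py_loop sentences step_size L a c
      = c + ((pvScanW (L.map (fun i => PySem.Str.len (PySem.List.pyGetD sentences i "") + 1)) a).countP
              (fun x => decide (x ≤ step_size)) : Int) := by
  intro L
  induction L with
  | nil => intro _ a c; simp [calculate_sentence_step_py_loop, pvScanW]
  | cons i rest ih =>
    intro hL a c
    have hi := hL i (by simp)
    have hrest : ∀ j ∈ rest, PySem.List.pyGet? sentences j
        = some (PySem.List.pyGetD sentences j "") := fun j hj => hL j (by simp [hj])
    simp only [calculate_sentence_step_py_loop, hi, List.map_cons, pvScanW]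
    set w := PySem.Str.len (PySem.List.pyGetD sentences i "") + 1 with hw
    have hwpos : ∀ u ∈ rest.map (fun j => PySem.Str.len (PySem.List.pyGetD sentences j "") + 1),
        0 ≤ u := by
      intro u hu
      simp only [List.mem_map] at hu
      obtain ⟨j, _, rfl⟩ := hu
      have := pv_len_nonneg (PySem.List.pyGetD sentences j "")
      omega
    by_cases hb : a + w > step_size
    · rw [if_pos hb]
      rw [List.countP_cons]
      rw [pvScanW_count_zero step_size _ _ hwpos (by omega)]
      simp only [decide_eq_true_eq]
      rw [if_neg (by omega)]
      simp
    · rw [if_neg hb]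
      rw [ih hrest (a + w) (c + 1)]
      rw [List.countP_cons]
      simp only [decide_eq_true_eq]
      rw [if_pos (by omega)]
      push_cast
      ring

-- ===== VERDICT (by name: the statement is the Claim_ definition above) =====
theorem calculate_sentence_step_py_spec : Claim_equal_calculate_sentence_step_py := by
  intro sentences position step_size _ hp
  unfold Pre_calculate_sentence_step_py at hp
  unfold Spec_calculate_sentence_step_py
  unfold calculate_sentence_step_py calculate_sentence_step_py_alt
  set L := PySem.List.pyRange position (sentences.length : Int) 1 with hLdef
  have hL : ∀ i ∈ L, PySem.List.pyGet? sentences i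
      = some (PySem.List.pyGetD sentences i "") := by
    intro i hiL
    rw [hLdef, PySem.List.mem_pyRange_one] at hiL
    exact pv_get_eq_getD sentences i (by omega) hiL.2
  have hwpos : ∀ u ∈ L.map (fun j => PySem.Str.len (PySem.List.pyGetD sentences j "") + 1),
      0 ≤ u := by
    intro u hu
    simp only [List.mem_map] at hu
    obtain ⟨j, _, rfl⟩ := hu
    have := pv_len_nonneg (PySem.List.pyGetD sentences j "")
    omega
  have hloop := pv_loop_eq_count sentences step_size L hL 0 0
  have hfold := pv_foldl_scanW
    (L.map (fun i => PySem.Str.len (PySem.List.pyGetD sentences i "") + 1)) 0 []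
  simp only [hloop, hfold, List.nil_append,
    pv_bisect_eq_countP _ _ (pvScanW_pairwise _ 0 hwpos)]
  omega
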